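-- pv_equiv track=rewrite | github.com/Devanwow/voidpulse | wow_updater_devan.py | get_ah_price_by_name
-- ===== SOURCE A (Python) =====
-- def get_ah_price_by_name(item_name, price_map_by_name):
--     """Look up AH price by item name from cached name→price map."""
--     name_lower = item_name.lower()
--     for k, v in price_map_by_name.items():
--         if k.lower() == name_lower:
--             return v
--     # Fuzzy: check if name is contained
--     for k, v in price_map_by_name.items():
--         if name_lower in k.lower() or k.lower() in name_lower:
--             return v
--     return None
-- ===== SOURCE B (Python) =====
-- def get_ah_price_by_name(item_name, price_map_by_name):
--     """Single pass: return exact (case-insensitive) match immediately;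
--     remember the first fuzzy substring match as a fallback."""
--     name_lower = item_name.lower()
--     fuzzy = None
--     have_fuzzy = False
--     for k, v in price_map_by_name.items():
--         kl = k.lower()
--         if kl == name_lower:
--             return v
--         if not have_fuzzy and (name_lower in kl or kl in name_lower):
--             fuzzy = v
--             have_fuzzy = True
--     return fuzzy
-- ===== Notes on version B (the rewrite author's own statement) =====
-- stated objective: simpler
-- what changed: Replaces A's two full passes over the map (exact pass, then fuzzy pass) with a single pass that returns on an exact match and records the first fuzzy substring match as a post-loop fallback.
import Mathlib
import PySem

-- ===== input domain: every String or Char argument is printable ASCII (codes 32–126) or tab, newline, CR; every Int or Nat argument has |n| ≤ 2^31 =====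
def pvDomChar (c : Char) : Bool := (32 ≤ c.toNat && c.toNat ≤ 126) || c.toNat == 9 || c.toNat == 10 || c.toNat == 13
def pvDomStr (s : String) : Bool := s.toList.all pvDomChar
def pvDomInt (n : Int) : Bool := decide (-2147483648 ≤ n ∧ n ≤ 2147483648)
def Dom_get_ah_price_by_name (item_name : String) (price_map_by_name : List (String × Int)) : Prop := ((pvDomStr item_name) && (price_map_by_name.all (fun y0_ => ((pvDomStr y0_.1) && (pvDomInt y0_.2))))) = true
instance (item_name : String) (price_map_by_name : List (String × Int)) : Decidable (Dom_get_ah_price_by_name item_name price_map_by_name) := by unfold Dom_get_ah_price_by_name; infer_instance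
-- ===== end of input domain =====

-- B merges A's two passes (exact scan, then fuzzy scan) into one pass that returns an exact
-- match immediately and records the first fuzzy match as a post-loop fallback; objective: simpler.


-- ===== PORT A =====
-- first loop: return v for the first k with k.lower() == name_lower
def pvAExact (nl : String) : List (String × Int) → Option Int
  | [] => none
  | (k, v) :: rest =>
    if PySem.Str.lower k == nl then some v else pvAExact nl rest

-- second loop: return v for the first k with name_lower in k.lower() or k.lower() in name_lower
def pvAFuzzy (nl : String) : List (String × Int) → Option Int
  | [] => none
  | (k, v) :: rest =>
    if PySem.Str.isIn nl (PySem.Str.lower k) || PySem.Str.isIn (PySem.Str.lower k) nl then some v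
    else pvAFuzzy nl rest

def get_ah_price_by_name (item_name : String) (price_map_by_name : List (String × Int)) : Option Int :=
  let name_lower := PySem.Str.lower item_name
  match pvAExact name_lower price_map_by_name with
  | some v => some v
  | none => pvAFuzzy name_lower price_map_by_name

-- ===== PORT B =====
-- single pass; `fuzzy : Option Int` is the (fuzzy, have_fuzzy) fallback state
def pvBLoop (nl : String) (fuzzy : Option Int) : List (String × Int) → Option Int
  | [] => fuzzy
  | (k, v) :: rest =>
    let kl := PySem.Str.lower k
    if kl == nl then some v
    else if fuzzy.isNone && (PySem.Str.isIn nl kl || PySem.Str.isIn kl nl) then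
      pvBLoop nl (some v) rest
    else
      pvBLoop nl fuzzy rest

def get_ah_price_by_name_alt (item_name : String) (price_map_by_name : List (String × Int)) : Option Int :=
  pvBLoop (PySem.Str.lower item_name) none price_map_by_name

-- ===== PRECONDITION & SPEC =====
def Spec_get_ah_price_by_name (item_name : String) (price_map_by_name : List (String × Int)) (out : Option Int) : Prop := out = get_ah_price_by_name_alt item_name price_map_by_name
instance (item_name : String) (price_map_by_name : List (String × Int)) (out : Option Int) : Decidable (Spec_get_ah_price_by_name item_name price_map_by_name out) := by unfold Spec_get_ah_price_by_name; infer_instance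

-- ===== CLAIM (what is proved, stated in full; the proofs are below) =====
def Claim_equal_get_ah_price_by_name : Prop := ∀ (item_name : String) (price_map_by_name : List (String × Int)), Dom_get_ah_price_by_name item_name price_map_by_name → Spec_get_ah_price_by_name item_name price_map_by_name (get_ah_price_by_name item_name price_map_by_name)

-- ===== LEMMAS AND PROOFS =====

-- the one-pass loop equals: first exact match, else stored fallback, else first fuzzy match
theorem pvBLoop_eq (nl : String) (m : List (String × Int)) : ∀ (fz : Option Int),
    pvBLoop nl fz m =
      match pvAExact nl m with
      | some v => some v
      | none => match fz with
        | some f => some f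
        | none => pvAFuzzy nl m := by
  induction m with
  | nil => intro fz; cases fz <;> simp [pvBLoop, pvAExact, pvAFuzzy]
  | cons p rest ih =>
    intro fz
    obtain ⟨k, v⟩ := p
    by_cases hx : PySem.Str.lower k == nl
    · simp [pvBLoop, pvAExact, hx]
    · cases fz with
      | some f => simp [pvBLoop, pvAExact, hx, ih]
      | none =>
        cases h : pvAExact nl rest <;>
          simp [pvBLoop, pvAExact, pvAFuzzy, hx, ih, h] <;> split_ifs <;> rfl

-- ===== VERDICT (by name: the statement is the Claim_ definition above) =====
theorem get_ah_price_by_name_spec : Claim_equal_get_ah_price_by_name := by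
  intro item_name m _
  unfold Spec_get_ah_price_by_name get_ah_price_by_name get_ah_price_by_name_alt
  rw [pvBLoop_eq]
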